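-- pv_equiv track=rewrite | github.com/elsenorbw/advent-of-code-2019 | day4/day4_part2.py | has_exactly_doubles
-- ===== SOURCE A (Python) =====
-- def has_exactly_doubles(a):
--     """
--     Return True if the array a has a pair of digits which are identical but not part of a larger triple or greater
--     """
--     result = False
--     # nasty one, lots of edge cases
--     # ok, so we can walk through the case
--     in_double = False
--     poison = False
--     for idx in range(1, len(a)):
--         this_char = a[idx]
--         previous_char = a[idx - 1]
--         if this_char == previous_char:
--             # ok, it's a match, which is either good or bad
--             if in_double:
--                 # crap, this poisons our double
--                 poison = True
--             else:
--                 # yay, now in a double !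
--                 in_double = True
--         else:
--             # did we just finish a double ?
--             if in_double:
--                 if not poison:
--                     # just left a true double - we're good regardless of what happens next
--                     result = True
--             # in any event, not in a double now
--             in_double = False
--             poison = False
--     # reached the end, we may still be in a double that didn't end.
--     result = result or (in_double and not poison)
--     return result
-- ===== SOURCE B (Python) =====
-- def has_exactly_doubles(a):
--     """
--     Return True if the array a has a pair of digits which are identical but not part of a larger triple or greater
--     """
--     # Run-length encode: collect the length of every maximal run of equal
--     # adjacent elements, then succeed iff some run has length exactly 2.
--     lengths = []
--     run = 0
--     prev = None
--     for x in a: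
--         if run > 0 and x == prev:
--             run += 1
--         else:
--             if run > 0:
--                 lengths.append(run)
--             run = 1
--             prev = x
--     if run > 0:
--         lengths.append(run)
--     return 2 in lengths
-- ===== Notes on version B (the rewrite author's own statement) =====
-- stated objective: alternative
-- what changed: B replaces A's stateful in_double/poison flag machine over index pairs by a run-length-encoding pass that collects the lengths of all maximal runs of equal adjacent elements and then returns whether 2 occurs among them.
import Mathlib
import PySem

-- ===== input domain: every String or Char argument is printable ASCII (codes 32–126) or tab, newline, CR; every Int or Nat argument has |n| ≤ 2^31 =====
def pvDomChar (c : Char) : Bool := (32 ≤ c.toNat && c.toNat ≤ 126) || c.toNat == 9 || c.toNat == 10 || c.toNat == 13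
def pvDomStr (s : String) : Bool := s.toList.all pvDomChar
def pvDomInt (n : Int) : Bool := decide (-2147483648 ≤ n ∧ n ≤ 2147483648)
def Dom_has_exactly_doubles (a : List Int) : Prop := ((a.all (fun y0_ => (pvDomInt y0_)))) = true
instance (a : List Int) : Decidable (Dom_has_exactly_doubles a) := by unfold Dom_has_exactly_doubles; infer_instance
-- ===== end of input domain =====

-- B replaces A's in_double/poison flag machine by a run-length encoding pass
-- followed by a membership test for a run of length exactly 2 (alternative
-- decomposition, same linear cost).

-- ===== PORT A =====
-- literal transliteration of A: indexed scan over range(1, len(a)) carrying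
-- (result, in_double, poison); a[idx] ported as pyGetD (idx is always in range).
def has_exactly_doubles (a : List Int) : Bool :=
  let st := (PySem.List.pyRange 1 (a.length : Int) 1).foldl
    (fun (st : Bool × Bool × Bool) idx =>
      let result := st.1
      let in_double := st.2.1
      let poison := st.2.2
      let this_char := PySem.List.pyGetD a idx 0
      let previous_char := PySem.List.pyGetD a (idx - 1) 0
      if this_char == previous_char then
        if in_double then (result, in_double, true)
        else (result, true, poison)
      else
        ((if in_double then (if !poison then true else result) else result), false, false))
    (false, false, false)
  st.1 || (st.2.1 && !st.2.2)

-- ===== PORT B =====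
-- literal transliteration of Source B: one pass building the list of maximal-run
-- lengths (state = (lengths, run, prev)), then '2 in lengths'.
def has_exactly_doubles_alt (a : List Int) : Bool :=
  let st := a.foldl
    (fun (st : List Nat × Nat × Option Int) x =>
      let lengths := st.1
      let run := st.2.1
      let prev := st.2.2
      if run > 0 && (some x == prev) then (lengths, run + 1, prev)
      else ((if run > 0 then lengths ++ [run] else lengths), 1, some x))
    ([], 0, none)
  let lengths := if st.2.1 > 0 then st.1 ++ [st.2.1] else st.1
  lengths.contains 2

-- ===== PRECONDITION & SPEC =====
def Spec_has_exactly_doubles (a : List Int) (out : Bool) : Prop := out = has_exactly_doubles_alt a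
instance (a : List Int) (out : Bool) : Decidable (Spec_has_exactly_doubles a out) := by unfold Spec_has_exactly_doubles; infer_instance

-- ===== CLAIM (what is proved, stated in full; the proofs are below) =====
def Claim_equal_has_exactly_doubles : Prop := ∀ (a : List Int), Dom_has_exactly_doubles a → Spec_has_exactly_doubles a (has_exactly_doubles a)

-- ===== LEMMAS AND PROOFS =====

-- A's loop body as a function of the state and the pair (a[idx], a[idx-1]).
def pvStepA (st : Bool × Bool × Bool) (p : Int × Int) : Bool × Bool × Bool :=
  if p.1 == p.2 then
    if st.2.1 then (st.1, st.2.1, true) else (st.1, true, st.2.2)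
  else ((if st.2.1 then (if !st.2.2 then true else st.1) else st.1), false, false)

def pvFinal (st : Bool × Bool × Bool) : Bool := st.1 || (st.2.1 && !st.2.2)

-- B's loop body as a named function.
def pvStepB (st : List Nat × Nat × Option Int) (x : Int) : List Nat × Nat × Option Int :=
  if st.2.1 > 0 && (some x == st.2.2) then (st.1, st.2.1 + 1, st.2.2)
  else ((if st.2.1 > 0 then st.1 ++ [st.2.1] else st.1), 1, some x)

-- the consecutive pairs (a[idx], a[idx-1]) of prev :: rest
def pvPairs : Int → List Int → List (Int × Int)
  | _, [] => []
  | prev, y :: ys => (y, prev) :: pvPairs y ys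

-- "some maximal run has length exactly 2", scanning rest with a current run
-- of n copies of prev
def pvAnyRun : Int → Nat → List Int → Bool
  | _, n, [] => n == 2
  | prev, n, y :: ys => if y == prev then pvAnyRun y (n + 1) ys else ((n == 2) || pvAnyRun y 1 ys)

theorem pvPairs_length (xs : List Int) : ∀ x : Int, (pvPairs x xs).length = xs.length := by
  induction xs with
  | nil => intro x; rfl
  | cons y ys ih => intro x; simp [pvPairs, ih]

theorem pvPairs_getElem (xs : List Int) : ∀ (x : Int) (k : Nat) (h : k < xs.length),
    (pvPairs x xs)[k]'(by rw [pvPairs_length]; exact h) = (xs[k], (x :: xs)[k]'(by simp; omega)) := by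
  induction xs with
  | nil => intro x k h; simp at h
  | cons y ys ih =>
    intro x k h
    cases k with
    | zero => simp [pvPairs]
    | succ k =>
      have hk : k < ys.length := by simpa using h
      simpa [pvPairs] using ih y k hk

theorem pvMapPairs (x : Int) (xs : List Int) :
    (PySem.List.pyRange 1 (((x :: xs).length : Int)) 1).map
      (fun j => (PySem.List.pyGetD (x :: xs) j 0, PySem.List.pyGetD (x :: xs) (j - 1) 0))
    = pvPairs x xs := by
  apply List.ext_getElem
  · simp [PySem.List.length_pyRange_one, pvPairs_length]
  · intro k h1 h2
    have hk : k < xs.length := by rw [pvPairs_length] at h2; exact h2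
    have hkr : k < (PySem.List.pyRange 1 (((x :: xs).length : Int))).length := by
      simp [PySem.List.length_pyRange_one]; omega
    rw [List.getElem_map, PySem.List.getElem_pyRange_one _ _ _ hkr, pvPairs_getElem xs x k hk]
    have e1 : (1 : Int) + k = ((k + 1 : Nat) : Int) := by omega
    rw [e1]
    refine Prod.ext ?_ ?_
    · show PySem.List.pyGetD (x :: xs) ((k + 1 : Nat) : Int) 0 = xs[k]
      rw [PySem.List.pyGetD_natCast]
      have hx : xs[k]? = some xs[k] := List.getElem?_eq_getElem hk
      simp [List.getD_eq_getElem?_getD, hx]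
    · show PySem.List.pyGetD (x :: xs) (((k + 1 : Nat) : Int) - 1) 0 = (x :: xs)[k]'(by simp; omega)
      have e3 : (((k + 1 : Nat) : Int) - 1) = ((k : Nat) : Int) := by omega
      rw [e3, PySem.List.pyGetD_natCast]
      have hx : (x :: xs)[k]? = some ((x :: xs)[k]'(by simp; omega)) :=
        List.getElem?_eq_getElem (by simp; omega)
      simp [List.getD_eq_getElem?_getD, hx]

theorem pvA1 (rest : List Int) : ∀ (prev : Int) (n : Nat) (r : Bool), 1 ≤ n →
    pvFinal ((pvPairs prev rest).foldl pvStepA (r, decide (2 ≤ n), decide (3 ≤ n)))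
      = (r || pvAnyRun prev n rest) := by
  induction rest with
  | nil =>
    intro prev n r hn
    simp [pvPairs, pvFinal, pvAnyRun]
    by_cases h2 : 2 ≤ n <;> by_cases h3 : 3 ≤ n <;> simp [h2, h3] <;> omega
  | cons y ys ih =>
    intro prev n r hn
    by_cases h : y = prev
    · subst h
      have hstep : pvStepA (r, decide (2 ≤ n), decide (3 ≤ n)) (y, y)
          = (r, decide (2 ≤ n + 1), decide (3 ≤ n + 1)) := by
        by_cases h2 : 2 ≤ n
        · simp [pvStepA, h2]; omega
        · have hn1 : n = 1 := by omega
          subst hn1; simp [pvStepA]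
      simp only [pvPairs, List.foldl_cons, hstep]
      rw [ih y (n + 1) r (by omega)]
      simp [pvAnyRun]
    · have hb : (y == prev) = false := by simp [h]
      have hstep : pvStepA (r, decide (2 ≤ n), decide (3 ≤ n)) (y, prev)
          = (r || (n == 2), decide (2 ≤ 1), decide (3 ≤ 1)) := by
        by_cases h2 : 2 ≤ n <;> by_cases h3 : 3 ≤ n <;>
          simp [pvStepA, hb, h2, h3] <;> omega
      simp only [pvPairs, List.foldl_cons, hstep]
      rw [ih y 1 (r || (n == 2)) (by omega)]
      simp [pvAnyRun, hb, Bool.or_assoc]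

theorem pvB1 (rest : List Int) : ∀ (prev : Int) (n : Nat) (lacc : List Nat), 1 ≤ n →
    (let st := rest.foldl pvStepB (lacc, n, some prev)
     (if st.2.1 > 0 then st.1 ++ [st.2.1] else st.1).contains 2)
      = (lacc.contains 2 || pvAnyRun prev n rest) := by
  induction rest with
  | nil =>
    intro prev n lacc hn
    have hpos : n > 0 := hn
    simp [pvAnyRun, hpos]
    cases decEq n 2 with
    | isTrue h => simp [h]
    | isFalse h => simp [h, Ne.symm h]
  | cons x xs ih =>
    intro prev n lacc hn
    by_cases h : x = prev
    · subst h
      have hstep : pvStepB (lacc, n, some x) x = (lacc, n + 1, some x) := by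
        simp [pvStepB]
      simp only [List.foldl_cons, hstep]
      rw [ih x (n + 1) lacc (by omega)]
      simp [pvAnyRun]
    · have hb : (x == prev) = false := by simp [h]
      have hstep : pvStepB (lacc, n, some prev) x = (lacc ++ [n], 1, some x) := by
        simp [pvStepB, h, Nat.pos_iff_ne_zero]; omega
      simp only [List.foldl_cons, hstep]
      rw [ih x 1 (lacc ++ [n]) (by omega)]
      simp [pvAnyRun, hb, Bool.or_assoc]
      cases decEq n 2 with
      | isTrue h2 => simp [h2]
      | isFalse h2 =>
        have hne : decide (2 = n) = false := by simp; omega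
        have hne' : (n == 2) = false := by simpa using h2
        simp [hne, hne']

theorem pvA_char (x : Int) (xs : List Int) :
    has_exactly_doubles (x :: xs) = pvAnyRun x 1 xs := by
  have h0 : has_exactly_doubles (x :: xs)
      = pvFinal ((pvPairs x xs).foldl pvStepA (false, false, false)) := by
    unfold has_exactly_doubles pvFinal
    rw [← pvMapPairs x xs, List.foldl_map]
    rfl
  rw [h0]
  have := pvA1 xs x 1 false (by omega)
  simpa using this

theorem pvB_char (x : Int) (xs : List Int) :
    has_exactly_doubles_alt (x :: xs) = pvAnyRun x 1 xs := by
  have h0 : has_exactly_doubles_alt (x :: xs)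
      = (let st := xs.foldl pvStepB ([], 1, some x)
         (if st.2.1 > 0 then st.1 ++ [st.2.1] else st.1).contains 2) := by
    unfold has_exactly_doubles_alt
    rfl
  rw [h0]
  have := pvB1 xs x 1 [] (by omega)
  simpa using this

-- ===== VERDICT (by name: the statement is the Claim_ definition above) =====
theorem has_exactly_doubles_spec : Claim_equal_has_exactly_doubles := by
  intro a _
  unfold Spec_has_exactly_doubles
  cases a with
  | nil => rfl
  | cons x xs => rw [pvA_char, pvB_char]
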